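-- pv_equiv track=rewrite | github.com/stephhoneyy/raaa | heidi_session_mock.py | icd10_specialties_for_code
-- ===== SOURCE A (Python) =====
-- ICD10_EXACT_SPECIALTY = {
--     "Z51": "oncology",                          # chemo / radiotherapy sessions
--     "Z79": "clinical pharmacology / medication review",  # long-term drug therapy
--     "Z00": "general practice / general medicine",        # general medical examination
--     "Z92": "clinical pharmacology / medication review",  # personal history of medical treatment
-- }
--
-- ICD10_RANGE_SPECIALTY = [
--     (("C00", "D48"), "oncology / haematology"),          # neoplasms
--     (("E10", "E14"), "endocrinology (diabetes)"),
--     (("E20", "E35"), "endocrinology"),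
--     (("F00", "F99"), "psychiatry"),                      # mental / behavioural
--     (("G00", "G99"), "neurology"),
--     (("I00", "I99"), "cardiology"),                      # circulatory
--     (("M05", "M14"), "rheumatology"),                    # inflammatory polyarthropathies
--     (("M80", "M81"), "endocrinology / bone health"),     # osteoporosis
--     (("N00", "N19"), "nephrology"),                      # kidney
--     (("N20", "N39"), "urology"),
--     # Z00-Z13: general exams / screening -> GP / general med
--     (("Z00", "Z13"), "general practice / general medicine"),
--     # Z80-Z99: personal/family history, long-term care -> chronic/general
--     (("Z80", "Z99"), "general medicine / chronic disease"),
-- ]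
--
-- def _clean_icd10_prefix(code: str) -> str:
--     """
--     Normalise an ICD-10 / ICD-10-CM code to a 3-character prefix for range matching.
--
--     Examples:
--       "I50.0"  -> "I50"
--       "Z00.8"  -> "Z00"
--       "M80.00" -> "M80"
--     """
--     if not code:
--         return ""
--     c = code.strip().upper().replace(" ", "")
--     # Remove dot for consistency
--     c = c.replace(".", "")
--     # Use first 3 characters for prefix
--     return c[:3]
--
-- def icd10_specialties_for_code(code: str) -> list[str]:
--     """
--     Map a single ICD-10/ICD-10-CM-like code to one or more specialties.
--     """
--     prefix = _clean_icd10_prefix(code)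
--     if not prefix:
--         return []
--
--     # 1) Exact-prefix overrides
--     if prefix in ICD10_EXACT_SPECIALTY:
--         return [ICD10_EXACT_SPECIALTY[prefix]]
--
--     # 2) Range-based mapping
--     specs = set()
--     for (start, end), spec in ICD10_RANGE_SPECIALTY:
--         if start <= prefix <= end:
--             specs.add(spec)
--
--     return list(specs)
-- ===== SOURCE B (Python) =====
-- # One flat priority table: exact-override prefixes become singleton rows placed
-- # first (first match wins), followed by the disjoint ranges; a single scan with
-- # early return replaces A's dict lookup + scan-all-ranges-into-a-set.
-- _SPECIALTY_TABLE = [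
--     ("Z51", "Z51", "oncology"),
--     ("Z79", "Z79", "clinical pharmacology / medication review"),
--     ("Z00", "Z00", "general practice / general medicine"),
--     ("Z92", "Z92", "clinical pharmacology / medication review"),
--     ("C00", "D48", "oncology / haematology"),
--     ("E10", "E14", "endocrinology (diabetes)"),
--     ("E20", "E35", "endocrinology"),
--     ("F00", "F99", "psychiatry"),
--     ("G00", "G99", "neurology"),
--     ("I00", "I99", "cardiology"),
--     ("M05", "M14", "rheumatology"),
--     ("M80", "M81", "endocrinology / bone health"),
--     ("N00", "N19", "nephrology"),
--     ("N20", "N39", "urology"),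
--     ("Z00", "Z13", "general practice / general medicine"),
--     ("Z80", "Z99", "general medicine / chronic disease"),
-- ]
--
--
-- def icd10_specialties_for_code(code: str) -> list[str]:
--     prefix = "".join(ch for ch in code.strip().upper() if ch not in " .")[:3]
--     for start, end, spec in _SPECIALTY_TABLE:
--         if start <= prefix <= end:
--             return [spec]
--     return []
-- ===== Notes on version B (the rewrite author's own statement) =====
-- stated objective: alternative
-- what changed: B folds the exact-override dict and the disjoint range table into one flat priority table (override singletons first) scanned once with early return, and normalises the prefix with a single character filter instead of two replace passes.
import Mathlib
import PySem

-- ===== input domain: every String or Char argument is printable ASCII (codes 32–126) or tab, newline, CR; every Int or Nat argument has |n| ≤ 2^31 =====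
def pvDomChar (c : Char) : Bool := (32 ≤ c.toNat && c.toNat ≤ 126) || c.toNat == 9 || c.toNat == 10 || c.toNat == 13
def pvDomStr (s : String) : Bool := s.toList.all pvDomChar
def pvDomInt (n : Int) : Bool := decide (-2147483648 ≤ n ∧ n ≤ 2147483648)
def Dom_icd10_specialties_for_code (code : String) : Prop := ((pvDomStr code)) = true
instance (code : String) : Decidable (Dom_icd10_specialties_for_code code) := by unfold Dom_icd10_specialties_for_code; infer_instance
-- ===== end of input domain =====

-- B folds the exact-override dict and the range table into ONE flat priority table (override
-- singletons first) scanned with early return, and cleans the prefix with a single filter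
-- instead of two replace passes (objective: alternative; fixed-size table, no speed claim).

-- ===== PORT A =====
-- module-level data ICD10_EXACT_SPECIALTY / ICD10_RANGE_SPECIALTY and helper _clean_icd10_prefix
def icdExact : PySem.Dict String String := PySem.Dict.ofList
  [("Z51", "oncology"),
   ("Z79", "clinical pharmacology / medication review"),
   ("Z00", "general practice / general medicine"),
   ("Z92", "clinical pharmacology / medication review")]

def icdRanges : List ((String × String) × String) :=
  [(("C00", "D48"), "oncology / haematology"),
   (("E10", "E14"), "endocrinology (diabetes)"),
   (("E20", "E35"), "endocrinology"),
   (("F00", "F99"), "psychiatry"),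
   (("G00", "G99"), "neurology"),
   (("I00", "I99"), "cardiology"),
   (("M05", "M14"), "rheumatology"),
   (("M80", "M81"), "endocrinology / bone health"),
   (("N00", "N19"), "nephrology"),
   (("N20", "N39"), "urology"),
   (("Z00", "Z13"), "general practice / general medicine"),
   (("Z80", "Z99"), "general medicine / chronic disease")]

def cleanIcd10Prefix (code : String) : String :=
  if code = "" then ""
  else
    PySem.Str.slice
      (PySem.Str.replace (PySem.Str.replace (PySem.Str.upper (PySem.Str.strip code)) " " "") "." "")
      none (some 3)

-- A: exact-dict lookup, then scan every range, accumulating the matching specialties in a set,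
-- and return list(specs).  (list(specs) over a Python set is hash-ordered in general, but the
-- ranges are pairwise disjoint so specs holds at most one element — proved below — and a
-- 0/1-element set has only one iteration order, so returning the Set's list is exact.)
def icd10_specialties_for_code (code : String) : List String :=
  let pfx := cleanIcd10Prefix code
  if pfx = "" then []
  else
    match icdExact.get? pfx with
    | some s => [s]
    | none =>
        icdRanges.foldl
          (fun specs r => if r.1.1 ≤ pfx ∧ pfx ≤ r.1.2 then PySem.Set.add specs r.2 else specs)
          PySem.Set.empty

-- ===== PORT B =====
-- _SPECIALTY_TABLE of Source B: override singletons first, then the disjoint ranges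
def icdTable : List (String × String × String) :=
  [("Z51", "Z51", "oncology"),
   ("Z79", "Z79", "clinical pharmacology / medication review"),
   ("Z00", "Z00", "general practice / general medicine"),
   ("Z92", "Z92", "clinical pharmacology / medication review"),
   ("C00", "D48", "oncology / haematology"),
   ("E10", "E14", "endocrinology (diabetes)"),
   ("E20", "E35", "endocrinology"),
   ("F00", "F99", "psychiatry"),
   ("G00", "G99", "neurology"),
   ("I00", "I99", "cardiology"),
   ("M05", "M14", "rheumatology"),
   ("M80", "M81", "endocrinology / bone health"),
   ("N00", "N19", "nephrology"),
   ("N20", "N39", "urology"),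
   ("Z00", "Z13", "general practice / general medicine"),
   ("Z80", "Z99", "general medicine / chronic disease")]

-- the for-loop with early return: first matching row wins
def icdScan (p : String) : List (String × String × String) → List String
  | [] => []
  | (s, e, sp) :: rest => if s ≤ p ∧ p ≤ e then [sp] else icdScan p rest

def icd10_specialties_for_code_alt (code : String) : List String :=
  icdScan
    (String.ofList
      (((PySem.Str.upper (PySem.Str.strip code)).toList.filter
          (fun ch => !(ch == ' ' || ch == '.'))).take 3))
    icdTable

-- ===== PRECONDITION & SPEC =====
def Spec_icd10_specialties_for_code (code : String) (out : List String) : Prop := out = icd10_specialties_for_code_alt code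
instance (code : String) (out : List String) : Decidable (Spec_icd10_specialties_for_code code out) := by unfold Spec_icd10_specialties_for_code; infer_instance

-- ===== CLAIM (what is proved, stated in full; the proofs are below) =====
def Claim_equal_icd10_specialties_for_code : Prop := ∀ (code : String), Dom_icd10_specialties_for_code code → Spec_icd10_specialties_for_code code (icd10_specialties_for_code code)

-- ===== LEMMAS AND PROOFS =====

-- replacing a single character by "" is exactly a filter
lemma replace_go_single (c : Char) :
    ∀ (fuel : Nat) (l acc : List Char), l.length ≤ fuel →
      PySem.Chars.replace.go [c] [] fuel l acc
        = acc.reverse ++ l.filter (fun x => x ≠ c) := by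
  intro fuel
  induction fuel with
  | zero =>
      intro l acc h
      cases l with
      | nil => simp [PySem.Chars.replace.go]
      | cons a t => simp at h
  | succ n ih =>
      intro l acc h
      cases l with
      | nil => simp [PySem.Chars.replace.go]
      | cons a t =>
          by_cases hac : a = c
          · subst hac
            have hp : List.isPrefixOf [a] (a :: t) = true := by
              simp [List.isPrefixOf]
            simp only [PySem.Chars.replace.go, hp]
            rw [ih _ _ (by simpa using Nat.le_of_succ_le_succ h)]
            simp
          · have hp : List.isPrefixOf [c] (a :: t) = false := by
              simp [List.isPrefixOf]
              intro h'; exact absurd h'.symm hac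
            simp only [PySem.Chars.replace.go, hp]
            rw [if_neg (by simp), ih _ _ (by simpa using Nat.le_of_succ_le_succ h)]
            simp [hac]

lemma replace_single (c : Char) (l : List Char) :
    PySem.Chars.replace l [c] [] = l.filter (fun x => x ≠ c) := by
  rw [PySem.Chars.replace]
  simp only [List.isEmpty_cons, if_neg Bool.false_ne_true]
  exact replace_go_single c l.length l [] le_rfl

-- A's clean (strip / upper / replace ' ' / replace '.' / [:3]) = B's strip / upper / filter / take 3
lemma clean_eq (code : String) :
    cleanIcd10Prefix code
      = String.ofList
          (((PySem.Str.upper (PySem.Str.strip code)).toList.filter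
              (fun ch => !(ch == ' ' || ch == '.'))).take 3) := by
  by_cases hc : code = ""
  · subst hc; decide
  · rw [cleanIcd10Prefix, if_neg hc]
    apply String.toList_inj.mp
    rw [PySem.Str.slice, PySem.Str.replace, PySem.Str.replace,
        String.toList_ofList, String.toList_ofList, String.toList_ofList,
        PySem.Chars.slice_eq_listSlice, PySem.List.slice_to _ (by decide : (0:Int) ≤ 3),
        show (" " : String).toList = [' '] from rfl,
        show ("." : String).toList = ['.'] from rfl,
        show ("" : String).toList = [] from rfl,
        replace_single, replace_single, List.filter_filter]
    have h3 : Int.toNat 3 = 3 := rfl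
    have hf : ∀ l : List Char,
        l.filter (fun a => decide (a ≠ '.') && decide (a ≠ ' '))
          = l.filter (fun ch => !(ch == ' ' || ch == '.')) := by
      intro l
      apply List.filter_congr
      intro x _
      by_cases h1 : x = ' ' <;> by_cases h2 : x = '.' <;> simp [h1, h2]
    rw [h3, hf, String.toList_ofList]

-- a fold step matching no element of L leaves the accumulator unchanged
lemma foldl_no_match (p : String) (L : List ((String × String) × String)) (S : PySem.Set String)
    (h : ∀ r ∈ L, ¬(r.1.1 ≤ p ∧ p ≤ r.1.2)) :
    L.foldl (fun specs r => if r.1.1 ≤ p ∧ p ≤ r.1.2 then PySem.Set.add specs r.2 else specs) S = S := by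
  induction L with
  | nil => rfl
  | cons r L ih =>
      simp only [List.foldl_cons, if_neg (h r (List.mem_cons_self))]
      exact ih (fun r' hr' => h r' (List.mem_cons_of_mem _ hr'))

-- over pairwise-disjoint ranges A's set-scan equals B's first-match scan of the same rows
lemma foldl_scan_eq_icdScan (p : String) (L : List ((String × String) × String))
    (hP : L.Pairwise (fun a b => ¬((a.1.1 ≤ p ∧ p ≤ a.1.2) ∧ (b.1.1 ≤ p ∧ p ≤ b.1.2)))) :
    L.foldl (fun specs r => if r.1.1 ≤ p ∧ p ≤ r.1.2 then PySem.Set.add specs r.2 else specs) PySem.Set.empty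
      = icdScan p (L.map (fun r => (r.1.1, r.1.2, r.2))) := by
  induction L with
  | nil => rfl
  | cons r L ih =>
      rcases List.pairwise_cons.mp hP with ⟨hd, hP'⟩
      by_cases h : r.1.1 ≤ p ∧ p ≤ r.1.2
      · rw [List.map_cons, List.foldl_cons, if_pos h]
        rw [foldl_no_match p L _ (fun r' hr' hc => hd r' hr' ⟨h, hc⟩)]
        simp [icdScan, h]
      · rw [List.map_cons, List.foldl_cons, if_neg h, ih hP']
        simp only [icdScan]
        rw [if_neg h]

-- the heart: A's (empty-check, dict lookup, set-scan) equals B's single priority-table scan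
lemma core_eq (p : String) :
    (if p = "" then []
     else
       match icdExact.get? p with
       | some s => [s]
       | none =>
           icdRanges.foldl
             (fun specs r => if r.1.1 ≤ p ∧ p ≤ r.1.2 then PySem.Set.add specs r.2 else specs)
             PySem.Set.empty)
      = icdScan p icdTable := by
  by_cases h0 : p = ""
  · subst h0
    rw [if_pos rfl]
    have hno : ∀ (q e : String), q.toList ≠ [] → ¬(q ≤ "" ∧ ("" : String) ≤ e) := by
      intro q e hq hc
      have h1 := String.le_iff_toList_le.mp hc.1
      rw [show ("" : String).toList = [] from rfl] at h1
      cases hql : q.toList with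
      | nil => exact hq hql
      | cons a t => rw [hql] at h1; exact absurd (List.nil_lt_cons a t) (not_lt.mpr h1)
    simp only [icdTable, icdScan]
    rw [if_neg (hno _ _ (by decide)), if_neg (hno _ _ (by decide)), if_neg (hno _ _ (by decide)),
        if_neg (hno _ _ (by decide)), if_neg (hno _ _ (by decide)), if_neg (hno _ _ (by decide)),
        if_neg (hno _ _ (by decide)), if_neg (hno _ _ (by decide)), if_neg (hno _ _ (by decide)),
        if_neg (hno _ _ (by decide)), if_neg (hno _ _ (by decide)), if_neg (hno _ _ (by decide)),
        if_neg (hno _ _ (by decide)), if_neg (hno _ _ (by decide)), if_neg (hno _ _ (by decide)),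
        if_neg (hno _ _ (by decide))]
  by_cases h1 : p = "Z51"
  · subst h1
    rw [if_neg (by decide), show icdExact.get? "Z51" = some "oncology" from by decide]
    simp only [icdTable, icdScan]
    rw [if_pos ⟨le_refl _, le_refl _⟩]
  by_cases h2 : p = "Z79"
  · subst h2
    rw [if_neg (by decide),
        show icdExact.get? "Z79" = some "clinical pharmacology / medication review" from by decide]
    simp only [icdTable, icdScan]
    rw [if_neg (fun hc => absurd hc.2 (by simp; decide)), if_pos ⟨le_refl _, le_refl _⟩]
  by_cases h3 : p = "Z00"
  · subst h3
    rw [if_neg (by decide),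
        show icdExact.get? "Z00" = some "general practice / general medicine" from by decide]
    simp only [icdTable, icdScan]
    rw [if_neg (fun hc => absurd hc.1 (by simp; decide)),
        if_neg (fun hc => absurd hc.1 (by simp; decide)), if_pos ⟨le_refl _, le_refl _⟩]
  by_cases h4 : p = "Z92"
  · subst h4
    rw [if_neg (by decide),
        show icdExact.get? "Z92" = some "clinical pharmacology / medication review" from by decide]
    simp only [icdTable, icdScan]
    rw [if_neg (fun hc => absurd hc.2 (by simp; decide)),
        if_neg (fun hc => absurd hc.2 (by simp; decide)),
        if_neg (fun hc => absurd hc.2 (by simp; decide)), if_pos ⟨le_refl _, le_refl _⟩]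
  rw [if_neg h0]
  have hget : icdExact.get? p = none := by
    rw [show icdExact = PySem.Dict.mk
      [("Z51", "oncology"),
       ("Z79", "clinical pharmacology / medication review"),
       ("Z00", "general practice / general medicine"),
       ("Z92", "clinical pharmacology / medication review")] from by decide]
    simp [PySem.Dict.get?]
    exact ⟨fun h => h1 h.symm, fun h => h2 h.symm, fun h => h3 h.symm, fun h => h4 h.symm⟩
  rw [hget]
  have hPW : icdRanges.Pairwise
      (fun a b => ¬((a.1.1 ≤ p ∧ p ≤ a.1.2) ∧ (b.1.1 ≤ p ∧ p ≤ b.1.2))) := by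
    have hlt : icdRanges.Pairwise (fun a b => a.1.2 < b.1.1) := by
      simp [icdRanges, List.pairwise_cons]
      and_intros <;> decide
    exact hlt.imp (fun {a b} h hc =>
      absurd (lt_of_le_of_lt (le_trans hc.2.1 hc.1.2) h) (lt_irrefl _))
  rw [foldl_scan_eq_icdScan p icdRanges hPW]
  have hsingle : ∀ q : String, p ≠ q → ¬(q ≤ p ∧ p ≤ q) :=
    fun q hq hc => hq (le_antisymm hc.2 hc.1)
  simp only [icdTable, icdRanges, List.map_cons, List.map_nil, icdScan]
  rw [if_neg (hsingle _ h1), if_neg (hsingle _ h2), if_neg (hsingle _ h3), if_neg (hsingle _ h4)]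

-- ===== VERDICT (by name: the statement is the Claim_ definition above) =====
theorem icd10_specialties_for_code_spec : Claim_equal_icd10_specialties_for_code := by
  intro code _
  unfold Spec_icd10_specialties_for_code
  unfold icd10_specialties_for_code icd10_specialties_for_code_alt
  rw [← clean_eq code]
  exact core_eq (cleanIcd10Prefix code)
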